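-- pv_equiv track=rewrite | github.com/iSelickiy/GBHWV2 | 1quarterPY/igor_selickiy_dz_5/task_5_3.py | zip_longest
-- ===== SOURCE A (Python) =====
-- def zip_longest(arg1, arg2):
--     counter = 0
--     for i in arg1:
--         if len(arg2) > counter:
--             res = i, arg2[counter]
--             counter += 1
--             yield res
--         else:
--             yield i, None
-- ===== SOURCE B (Python) =====
-- def zip_longest(arg1, arg2):
--     # Pad arg2 with None up to len(arg1), then a single zip driven by arg1.
--     padded = list(arg2) + [None] * (len(arg1) - len(arg2))
--     yield from zip(arg1, padded)
-- ===== Notes on version B (the rewrite author's own statement) =====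
-- stated objective: idiomatic
-- what changed: Replaces the manual counter loop with a branch over arg2's length by building the None-padded second list once and doing a single zip driven by arg1.
import Mathlib
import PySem

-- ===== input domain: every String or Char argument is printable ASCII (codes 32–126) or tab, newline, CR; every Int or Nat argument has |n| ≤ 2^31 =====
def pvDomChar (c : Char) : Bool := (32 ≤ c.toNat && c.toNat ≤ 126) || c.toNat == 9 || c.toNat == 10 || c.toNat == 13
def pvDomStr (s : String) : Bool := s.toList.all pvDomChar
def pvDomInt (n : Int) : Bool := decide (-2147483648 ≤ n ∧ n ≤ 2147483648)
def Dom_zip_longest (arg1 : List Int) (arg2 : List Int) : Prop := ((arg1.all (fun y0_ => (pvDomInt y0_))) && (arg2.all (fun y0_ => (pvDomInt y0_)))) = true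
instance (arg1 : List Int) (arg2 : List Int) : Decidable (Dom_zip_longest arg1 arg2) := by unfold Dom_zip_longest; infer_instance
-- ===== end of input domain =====

-- ===== PORT A =====
-- counter-indexed loop of A; in the then-branch arg2[counter] is in range (guard), so pyGet? returns `some` of it — exact
def zipLongestGo (arg2 : List Int) : List Int → Int → List (Int × Option Int)
  | [], _ => []
  | i :: rest, counter =>
    if (arg2.length : Int) > counter then
      (i, PySem.List.pyGet? arg2 counter) :: zipLongestGo arg2 rest (counter + 1)
    else
      (i, none) :: zipLongestGo arg2 rest counter

def zip_longest (arg1 : List Int) (arg2 : List Int) : List (Int × Option Int) :=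
  zipLongestGo arg2 arg1 0

-- ===== PORT B =====
def zip_longest_alt (arg1 : List Int) (arg2 : List Int) : List (Int × Option Int) :=
  arg1.zip (arg2.map some ++ List.replicate (arg1.length - arg2.length) none)

-- ===== PRECONDITION & SPEC =====
def Spec_zip_longest (arg1 : List Int) (arg2 : List Int) (out : List (Int × Option Int)) : Prop := out = zip_longest_alt arg1 arg2
instance (arg1 : List Int) (arg2 : List Int) (out : List (Int × Option Int)) : Decidable (Spec_zip_longest arg1 arg2 out) := by unfold Spec_zip_longest; infer_instance

-- ===== CLAIM (what is proved, stated in full; the proofs are below) =====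
def Claim_equal_zip_longest : Prop := ∀ (arg1 : List Int) (arg2 : List Int), Dom_zip_longest arg1 arg2 → Spec_zip_longest arg1 arg2 (zip_longest arg1 arg2)

-- ===== LEMMAS AND PROOFS =====

-- ===== VERDICT (by name: the statement is the Claim_ definition above) =====
lemma zipLongestGo_eq (arg2 : List Int) (l : List Int) :
    ∀ c : Nat, zipLongestGo arg2 l (c : Int)
      = l.zip ((arg2.drop c).map some ++ List.replicate (l.length - (arg2.length - c)) none) := by
  induction l with
  | nil => intro c; simp [zipLongestGo]
  | cons i rest ih =>
    intro c
    by_cases h : c < arg2.length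
    · have hg : (arg2.length : Int) > (c : Int) := by exact_mod_cast h
      have hd : arg2.drop c = arg2[c] :: arg2.drop (c + 1) :=
        (List.drop_eq_getElem_cons h)
      have : zipLongestGo arg2 (i :: rest) (c : Int)
          = (i, PySem.List.pyGet? arg2 (c : Int)) :: zipLongestGo arg2 rest ((c : Int) + 1) := by
        simp [zipLongestGo, hg]
      have hc1 : ((c : Int) + 1) = ((c + 1 : Nat) : Int) := by push_cast; ring
      have hlen : rest.length + 1 - (arg2.length - c)
          = rest.length - (arg2.length - (c + 1)) := by omega
      rw [this, PySem.List.pyGet?_natCast, List.getElem?_eq_getElem h, hc1, ih (c + 1), hd]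
      simp only [List.map_cons, List.cons_append, List.length_cons, hlen, List.zip_cons_cons]
    · have hg : ¬ ((arg2.length : Int) > (c : Int)) := by exact_mod_cast h
      have hd : arg2.drop c = [] := List.drop_eq_nil_of_le (by omega)
      have : zipLongestGo arg2 (i :: rest) (c : Int)
          = (i, none) :: zipLongestGo arg2 rest (c : Int) := by
        simp [zipLongestGo, hg]
      rw [this, ih c, hd]
      have h0 : arg2.length - c = 0 := by omega
      simp [h0, List.replicate_succ, List.zip]

theorem zip_longest_spec : Claim_equal_zip_longest := by
  intro arg1 arg2 _
  unfold Spec_zip_longest zip_longest zip_longest_alt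
  have := zipLongestGo_eq arg2 arg1 0
  simpa using this
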